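-- pv_equiv track=rewrite | github.com/koenigermarco-tapin/Tap-In-App | translate-stripes-comprehensive.py | fix_internal_links
-- ===== SOURCE A (Python) =====
-- def fix_internal_links(content, belt_name):
--     """Update all internal links to point to German versions"""
--     link_replacements = {
--         'white-belt.html': 'white-belt-de.html',
--         'blue-belt.html': 'blue-belt-de.html',
--         'purple-belt.html': 'purple-belt-de.html',
--         'brown-belt.html': 'brown-belt-de.html',
--         'black-belt.html': 'black-belt-de.html',
--         'gym-dashboard.html': 'gym-dashboard-de.html',
--         'learning-hub.html': 'learning-hub-de.html',
--     }
--
--     # Add stripe links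
--     belt_prefix = belt_name.lower().replace('-belt', '')
--     for i in range(1, 5):
--         old_link = f'{belt_prefix}-belt-stripe{i}-gamified.html'
--         new_link = f'{belt_prefix}-belt-stripe{i}-gamified-de.html'
--         link_replacements[old_link] = new_link
--
--     # Replace links
--     for old, new in link_replacements.items():
--         if not old.endswith('-de.html'):
--             content = content.replace(f'href="{old}"', f'href="{new}"')
--             content = content.replace(f"href='{old}'", f"href='{new}'")
--             content = content.replace(f'window.location.href = "{old}"', f'window.location.href = "{new}"')
--             content = content.replace(f"window.location.href = '{old}'", f"window.location.href = '{new}'")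
--
--     return content
-- ===== SOURCE B (Python) =====
-- def _context_pairs(old, new):
--     return [
--         ('href="%s"' % old, 'href="%s"' % new),
--         ("href='%s'" % old, "href='%s'" % new),
--         ('window.location.href = "%s"' % old, 'window.location.href = "%s"' % new),
--         ("window.location.href = '%s'" % old, "window.location.href = '%s'" % new),
--     ]
--
--
-- def _apply(s, pairs):
--     if not pairs:
--         return s
--     (old, new) = pairs[0]
--     return _apply(s.replace(old, new), pairs[1:])
--
--
-- def fix_internal_links(content, belt_name):
--     """Update all internal links to point to German versions"""
--     belt_prefix = belt_name.lower().replace('-belt', '')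
--     names = ['white-belt', 'blue-belt', 'purple-belt', 'brown-belt', 'black-belt',
--              'gym-dashboard', 'learning-hub']
--     names += ['%s-belt-stripe%d-gamified' % (belt_prefix, i) for i in range(1, 5)]
--     pairs = [p for name in names
--              for p in _context_pairs(name + '.html', name + '-de.html')]
--     return _apply(content, pairs)
-- ===== Notes on version B (the rewrite author's own statement) =====
-- stated objective: simpler
-- what changed: B drops the dict and the always-false endswith('-de.html') guard, precomputes the flat list of all 44 (old, new) context patterns up front, and applies them with a small recursive helper instead of A's nested loops mutating content in place.
import Mathlib
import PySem

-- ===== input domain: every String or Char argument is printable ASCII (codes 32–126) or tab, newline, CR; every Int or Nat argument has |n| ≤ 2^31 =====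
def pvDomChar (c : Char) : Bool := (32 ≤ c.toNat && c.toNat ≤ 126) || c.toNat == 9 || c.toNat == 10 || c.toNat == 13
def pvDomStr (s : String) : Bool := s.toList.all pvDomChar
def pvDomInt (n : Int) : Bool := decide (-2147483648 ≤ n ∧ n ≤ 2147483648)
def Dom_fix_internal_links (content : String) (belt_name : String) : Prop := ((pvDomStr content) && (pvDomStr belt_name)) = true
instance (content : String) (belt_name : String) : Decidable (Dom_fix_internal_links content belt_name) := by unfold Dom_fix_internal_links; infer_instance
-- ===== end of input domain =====

-- B replaces A's dict-plus-guard nested replacement loops by one flat precomputed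
-- (old, new) pattern list applied by a recursive helper: the same sequence of
-- replaces, a plainer decomposition (objective: simpler; not faster).

-- ===== PORT A =====
def fix_internal_links (content : String) (belt_name : String) : String :=
  let link_replacements : PySem.Dict String String := PySem.Dict.ofList [
    ("white-belt.html", "white-belt-de.html"),
    ("blue-belt.html", "blue-belt-de.html"),
    ("purple-belt.html", "purple-belt-de.html"),
    ("brown-belt.html", "brown-belt-de.html"),
    ("black-belt.html", "black-belt-de.html"),
    ("gym-dashboard.html", "gym-dashboard-de.html"),
    ("learning-hub.html", "learning-hub-de.html")]
  let belt_prefix := PySem.Str.replace (PySem.Str.lower belt_name) "-belt" ""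
  let link_replacements := (PySem.List.pyRange 1 5 1).foldl (fun d i =>
    let old_link := belt_prefix ++ "-belt-stripe" ++ PySem.Int.toStr i ++ "-gamified.html"
    let new_link := belt_prefix ++ "-belt-stripe" ++ PySem.Int.toStr i ++ "-gamified-de.html"
    d.insert old_link new_link) link_replacements
  link_replacements.items.foldl (fun content p =>
    if !(PySem.Str.endswith p.1 "-de.html") then
      let content := PySem.Str.replace content ("href=\"" ++ p.1 ++ "\"") ("href=\"" ++ p.2 ++ "\"")
      let content := PySem.Str.replace content ("href='" ++ p.1 ++ "'") ("href='" ++ p.2 ++ "'")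
      let content := PySem.Str.replace content ("window.location.href = \"" ++ p.1 ++ "\"") ("window.location.href = \"" ++ p.2 ++ "\"")
      PySem.Str.replace content ("window.location.href = '" ++ p.1 ++ "'") ("window.location.href = '" ++ p.2 ++ "'")
    else content) content

-- ===== PORT B =====
def contextPairs (old new : String) : List (String × String) :=
  [("href=\"" ++ old ++ "\"", "href=\"" ++ new ++ "\""),
   ("href='" ++ old ++ "'", "href='" ++ new ++ "'"),
   ("window.location.href = \"" ++ old ++ "\"", "window.location.href = \"" ++ new ++ "\""),
   ("window.location.href = '" ++ old ++ "'", "window.location.href = '" ++ new ++ "'")]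

def applyPairs (s : String) (pairs : List (String × String)) : String :=
  match pairs with
  | [] => s
  | (old, new) :: rest => applyPairs (PySem.Str.replace s old new) rest

def fix_internal_links_alt (content : String) (belt_name : String) : String :=
  let belt_prefix := PySem.Str.replace (PySem.Str.lower belt_name) "-belt" ""
  let names := ["white-belt", "blue-belt", "purple-belt", "brown-belt", "black-belt",
                "gym-dashboard", "learning-hub"]
      ++ (PySem.List.pyRange 1 5 1).map (fun i =>
            belt_prefix ++ "-belt-stripe" ++ PySem.Int.toStr i ++ "-gamified")
  let pairs := names.flatMap (fun name => contextPairs (name ++ ".html") (name ++ "-de.html"))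
  applyPairs content pairs


-- ===== PRECONDITION & SPEC =====
def Spec_fix_internal_links (content : String) (belt_name : String) (out : String) : Prop := out = fix_internal_links_alt content belt_name
instance (content : String) (belt_name : String) (out : String) : Decidable (Spec_fix_internal_links content belt_name out) := by unfold Spec_fix_internal_links; infer_instance

-- ===== CLAIM (what is proved, stated in full; the proofs are below) =====
def Claim_equal_fix_internal_links : Prop := ∀ (content : String) (belt_name : String), Dom_fix_internal_links content belt_name → Spec_fix_internal_links content belt_name (fix_internal_links content belt_name)

-- ===== LEMMAS AND PROOFS =====
def pvDict0 : PySem.Dict String String := PySem.Dict.ofList [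
    ("white-belt.html", "white-belt-de.html"),
    ("blue-belt.html", "blue-belt-de.html"),
    ("purple-belt.html", "purple-belt-de.html"),
    ("brown-belt.html", "brown-belt-de.html"),
    ("black-belt.html", "black-belt-de.html"),
    ("gym-dashboard.html", "gym-dashboard-de.html"),
    ("learning-hub.html", "learning-hub-de.html")]

theorem endswith_drop_ne (s t p : List Char) (hlen : p.length ≤ t.length)
    (h : t.drop (t.length - p.length) ≠ p) :
    PySem.Chars.endswith (s ++ t) p = false := by
  rw [Bool.eq_false_iff]
  intro hh
  rw [PySem.Chars.endswith_iff] at hh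
  obtain ⟨u, hu⟩ := hh
  apply h
  have h1 := congrArg (fun l : List Char => l.drop (l.length - p.length)) hu
  simp only [List.length_append] at h1
  rw [show u.length + p.length - p.length = u.length + 0 from by omega,
      List.drop_append,
      show s.length + t.length - p.length = s.length + (t.length - p.length) from by omega,
      List.drop_append,
      List.drop_eq_nil_of_le (by omega : s.length ≤ s.length + (t.length - p.length))] at h1
  simpa using h1.symm

theorem str_endswith_stripe (t : String) (h8 : 8 ≤ t.toList.length)
    (h : t.toList.drop (t.toList.length - 8) ≠ "-de.html".toList) :
    ∀ s : String, PySem.Str.endswith (s ++ t) "-de.html" = false := fun s => by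
  simp only [PySem.Str.endswith_eq, String.toList_append]
  exact endswith_drop_ne _ _ _ (by rw [show ("-de.html".toList).length = 8 from by decide]; omega) (by rw [show ("-de.html".toList).length = 8 from by decide]; exact h)

theorem klen (bp i : String) : ((((bp ++ "-belt-stripe") ++ i) ++ "-gamified.html").toList).length
    = bp.toList.length + i.toList.length + 26 := by
  simp [String.toList_append]
  omega

theorem kne (bp i lit : String) (h : lit.toList.length < i.toList.length + 26) :
    ((bp ++ "-belt-stripe") ++ i) ++ "-gamified.html" ≠ lit := by
  intro he
  have := congrArg (fun s : String => s.toList.length) he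
  simp only [klen] at this
  omega

theorem contains_pvDict0 (bp i : String) (h : i.toList.length = 1) :
    pvDict0.contains (((bp ++ "-belt-stripe") ++ i) ++ "-gamified.html") = false := by
  rw [PySem.Dict.contains_eq_decide_mem_keys]
  rw [show pvDict0.keys = ["white-belt.html","blue-belt.html","purple-belt.html","brown-belt.html","black-belt.html","gym-dashboard.html","learning-hub.html"] from by decide]
  simp only [List.mem_cons, List.not_mem_nil, or_false, decide_eq_false_iff_not, not_or]
  refine ⟨?_,?_,?_,?_,?_,?_,?_⟩ <;> (apply kne; rw [h]; decide)

theorem kinj (bp x y : String) (hxy : x.toList ≠ y.toList) :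
    ((bp ++ "-belt-stripe") ++ x) ++ "-gamified.html" ≠ ((bp ++ "-belt-stripe") ++ y) ++ "-gamified.html" := by
  intro he
  have h := congrArg String.toList he
  simp only [String.toList_append] at h
  exact hxy (List.append_cancel_left (List.append_cancel_right h))

theorem items_fold (bp : String) :
  ((PySem.List.pyRange 1 5 1).foldl (fun d i =>
    let old_link := bp ++ "-belt-stripe" ++ PySem.Int.toStr i ++ "-gamified.html"
    let new_link := bp ++ "-belt-stripe" ++ PySem.Int.toStr i ++ "-gamified-de.html"
    d.insert old_link new_link) pvDict0).items
  = pvDict0.items ++ [((1:Int)),2,3,4].map (fun i => (bp ++ "-belt-stripe" ++ PySem.Int.toStr i ++ "-gamified.html", bp ++ "-belt-stripe" ++ PySem.Int.toStr i ++ "-gamified-de.html")) := by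
  rw [show PySem.List.pyRange 1 5 1 = [1,2,3,4] from by decide]
  rw [PySem.Dict.items_foldl_insert_fresh]
  · intro a ha
    apply contains_pvDict0
    fin_cases ha <;> decide
  · simp only [List.map_cons, List.map_nil, List.nodup_cons, List.mem_cons, List.not_mem_nil, or_false, not_or, List.nodup_nil, and_true, not_false_eq_true]
    refine ⟨⟨?_,?_,?_⟩,⟨?_,?_⟩,?_⟩ <;> (apply kinj; decide)

theorem ports_agree (content belt_name : String) :
    fix_internal_links content belt_name = fix_internal_links_alt content belt_name := by
  simp only [fix_internal_links, fix_internal_links_alt]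
  rw [show (PySem.Dict.ofList [
    ("white-belt.html", "white-belt-de.html"),
    ("blue-belt.html", "blue-belt-de.html"),
    ("purple-belt.html", "purple-belt-de.html"),
    ("brown-belt.html", "brown-belt-de.html"),
    ("black-belt.html", "black-belt-de.html"),
    ("gym-dashboard.html", "gym-dashboard-de.html"),
    ("learning-hub.html", "learning-hub-de.html")] : PySem.Dict String String) = pvDict0 from rfl]
  rw [items_fold]
  rw [show pvDict0.items = [("white-belt.html", "white-belt-de.html"),
    ("blue-belt.html", "blue-belt-de.html"),
    ("purple-belt.html", "purple-belt-de.html"),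
    ("brown-belt.html", "brown-belt-de.html"),
    ("black-belt.html", "black-belt-de.html"),
    ("gym-dashboard.html", "gym-dashboard-de.html"),
    ("learning-hub.html", "learning-hub-de.html")] from by decide]
  rw [show PySem.List.pyRange 1 5 1 = [1,2,3,4] from by decide]
  simp only [List.map_cons, List.map_nil, List.cons_append, List.nil_append, List.foldl_cons, List.foldl_nil,
    List.flatMap_cons, List.flatMap_nil, contextPairs, applyPairs,
    show PySem.Int.toStr 1 = "1" from by decide, show PySem.Int.toStr 2 = "2" from by decide,
    show PySem.Int.toStr 3 = "3" from by decide, show PySem.Int.toStr 4 = "4" from by decide,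
    String.reduceAppend,
    str_endswith_stripe "-belt-stripe1-gamified.html" (by decide) (by decide),
    str_endswith_stripe "-belt-stripe2-gamified.html" (by decide) (by decide),
    str_endswith_stripe "-belt-stripe3-gamified.html" (by decide) (by decide),
    str_endswith_stripe "-belt-stripe4-gamified.html" (by decide) (by decide),
    show PySem.Str.endswith "white-belt.html" "-de.html" = false from by decide,
    show PySem.Str.endswith "blue-belt.html" "-de.html" = false from by decide,
    show PySem.Str.endswith "purple-belt.html" "-de.html" = false from by decide,
    show PySem.Str.endswith "brown-belt.html" "-de.html" = false from by decide,
    show PySem.Str.endswith "black-belt.html" "-de.html" = false from by decide,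
    show PySem.Str.endswith "gym-dashboard.html" "-de.html" = false from by decide,
    show PySem.Str.endswith "learning-hub.html" "-de.html" = false from by decide,
    Bool.not_false, if_true, String.append_assoc]

-- ===== VERDICT (by name: the statement is the Claim_ definition above) =====
theorem fix_internal_links_spec : Claim_equal_fix_internal_links := by
  intro content belt_name _
  unfold Spec_fix_internal_links
  exact ports_agree content belt_name
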